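-- pv_equiv track=rewrite | github.com/jso122-2/DAWN_pub_real | backend/visual/fix_all_visualizers.py | add_headless_import
-- ===== SOURCE A (Python) =====
-- def add_headless_import(content):
--     """Add matplotlib headless import at the top"""
--     if 'matplotlib.use(\'Agg\')' in content:
--         return content
--
--     # Find matplotlib import line
--     lines = content.split('\n')
--     new_lines = []
--     matplotlib_found = False
--
--     for line in lines:
--         if 'import matplotlib' in line and not matplotlib_found:
--             new_lines.append("# Configure matplotlib for headless operation")
--             new_lines.append("import matplotlib")
--             new_lines.append("matplotlib.use('Agg')  # Use non-interactive backend")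
--             new_lines.append("")
--             matplotlib_found = True
--             if line.strip() != 'import matplotlib':
--                 new_lines.append(line)
--         else:
--             new_lines.append(line)
--
--     return '\n'.join(new_lines)
-- ===== SOURCE B (Python) =====
-- def add_headless_import(content):
--     """Add matplotlib headless import at the top"""
--     if "matplotlib.use('Agg')" in content:
--         return content
--     lines = content.split('\n')
--     index = next((i for i, line in enumerate(lines) if 'import matplotlib' in line), None)
--     if index is None:
--         return '\n'.join(lines)
--     block = [
--         "# Configure matplotlib for headless operation",
--         "import matplotlib",
--         "matplotlib.use('Agg')  # Use non-interactive backend",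
--         "",
--     ]
--     if lines[index].strip() != 'import matplotlib':
--         block.append(lines[index])
--     return '\n'.join(lines[:index] + block + lines[index + 1:])
-- ===== Notes on version B (the rewrite author's own statement) =====
-- stated objective: alternative
-- what changed: Replaces A's flag-and-accumulate loop over all lines by computing the first matching line index once and assembling the result with list slicing (head ++ fixed block [++ kept line] ++ tail).
import Mathlib
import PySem

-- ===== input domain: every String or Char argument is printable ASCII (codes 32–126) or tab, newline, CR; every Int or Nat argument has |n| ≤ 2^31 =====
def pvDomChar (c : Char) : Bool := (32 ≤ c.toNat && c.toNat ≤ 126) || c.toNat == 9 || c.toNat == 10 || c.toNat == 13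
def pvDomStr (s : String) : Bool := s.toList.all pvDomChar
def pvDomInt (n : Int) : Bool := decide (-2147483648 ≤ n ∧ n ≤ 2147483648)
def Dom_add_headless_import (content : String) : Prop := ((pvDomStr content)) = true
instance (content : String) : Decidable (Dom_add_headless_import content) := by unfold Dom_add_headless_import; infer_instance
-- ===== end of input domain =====

-- B replaces A's flag-and-accumulate loop by find-first-index then list splice (objective: alternative decomposition, same cost).

-- ===== PORT A =====
-- step-for-step port of A's loop: state = (new_lines, matplotlib_found).
-- content.split('\n') is PySem.Str.split?; the separator "\n" is nonempty so it is always some — .getD [] only totalizes.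
def add_headless_import (content : String) : String :=
  if PySem.Str.isIn "matplotlib.use('Agg')" content then content
  else
    let lines := (PySem.Str.split? content "\n").getD []
    let st := lines.foldl (fun (st : List String × Bool) line =>
      if PySem.Str.isIn "import matplotlib" line && !st.2 then
        (st.1 ++ ["# Configure matplotlib for headless operation",
                  "import matplotlib",
                  "matplotlib.use('Agg')  # Use non-interactive backend",
                  ""] ++
          (if PySem.Str.strip line ≠ "import matplotlib" then [line] else []), true)
      else (st.1 ++ [line], st.2)) (([] : List String), false)
    PySem.Str.join "\n" st.1

-- ===== PORT B =====
-- port of Source B: first matching index via findIdx? (= the next(...) scan), then splice with take/drop.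
-- lines[index] is always in range (index comes from the scan), so .getD "" only totalizes.
def add_headless_import_alt (content : String) : String :=
  if PySem.Str.isIn "matplotlib.use('Agg')" content then content
  else
    let lines := (PySem.Str.split? content "\n").getD []
    match lines.findIdx? (fun line => PySem.Str.isIn "import matplotlib" line) with
    | none => PySem.Str.join "\n" lines
    | some i =>
      let hit := lines.getD i ""
      let block := ["# Configure matplotlib for headless operation",
                    "import matplotlib",
                    "matplotlib.use('Agg')  # Use non-interactive backend",
                    ""] ++
        (if PySem.Str.strip hit ≠ "import matplotlib" then [hit] else [])
      PySem.Str.join "\n" (lines.take i ++ block ++ lines.drop (i + 1))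

-- ===== PRECONDITION & SPEC =====
def Spec_add_headless_import (content : String) (out : String) : Prop := out = add_headless_import_alt content
instance (content : String) (out : String) : Decidable (Spec_add_headless_import content out) := by unfold Spec_add_headless_import; infer_instance

-- ===== CLAIM (what is proved, stated in full; the proofs are below) =====
def Claim_equal_add_headless_import : Prop := ∀ (content : String), Dom_add_headless_import content → Spec_add_headless_import content (add_headless_import content)

-- ===== LEMMAS AND PROOFS =====

-- names (definitionally equal to the ports' subterms) for the proofs; not used by the ports or the claim
def pvP (line : String) : Bool := PySem.Str.isIn "import matplotlib" line

def pvBlock4 : List String :=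
  ["# Configure matplotlib for headless operation",
   "import matplotlib",
   "matplotlib.use('Agg')  # Use non-interactive backend",
   ""]

def pvExtra (line : String) : List String :=
  if PySem.Str.strip line ≠ "import matplotlib" then [line] else []

def pvBlock (line : String) : List String := pvBlock4 ++ pvExtra line

def pvF (st : List String × Bool) (line : String) : List String × Bool :=
  if pvP line && !st.2 then (st.1 ++ pvBlock4 ++ pvExtra line, true)
  else (st.1 ++ [line], st.2)

lemma pvFoldTrue (lines : List String) : ∀ acc : List String,
    (lines.foldl pvF (acc, true)).1 = acc ++ lines := by
  induction lines with
  | nil => simp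
  | cons l rest ih =>
    intro acc
    have : pvF (acc, true) l = (acc ++ [l], true) := by simp [pvF]
    rw [List.foldl_cons, this, ih]
    simp

lemma pvFoldFalse (lines : List String) : ∀ acc : List String,
    (lines.foldl pvF (acc, false)).1 =
      acc ++ (match lines.findIdx? pvP with
        | none => lines
        | some i => lines.take i ++ pvBlock (lines.getD i "") ++ lines.drop (i + 1)) := by
  induction lines with
  | nil => simp
  | cons l rest ih =>
    intro acc
    by_cases hp : pvP l = true
    · have hf : pvF (acc, false) l = (acc ++ pvBlock l, true) := by
        simp [pvF, pvBlock, hp]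
      rw [List.foldl_cons, hf, pvFoldTrue]
      simp [List.findIdx?_cons, hp]
    · have hf : pvF (acc, false) l = (acc ++ [l], false) := by
        simp [pvF, hp]
      rw [List.foldl_cons, hf, ih]
      rw [List.findIdx?_cons]
      simp only [hp, Bool.false_eq_true, if_false]
      cases h : rest.findIdx? pvP with
      | none => simp
      | some i => simp [List.take_succ_cons, List.drop_succ_cons]

lemma pvMain (lines : List String) :
    PySem.Str.join "\n" ((lines.foldl pvF (([] : List String), false)).1) =
      (match lines.findIdx? (fun line => PySem.Str.isIn "import matplotlib" line) with
       | none => PySem.Str.join "\n" lines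
       | some i =>
         let hit := lines.getD i ""
         let block := ["# Configure matplotlib for headless operation",
                       "import matplotlib",
                       "matplotlib.use('Agg')  # Use non-interactive backend",
                       ""] ++
           (if PySem.Str.strip hit ≠ "import matplotlib" then [hit] else [])
         PySem.Str.join "\n" (lines.take i ++ block ++ lines.drop (i + 1))) := by
  rw [pvFoldFalse lines []]
  simp only [List.nil_append]
  have hpp : lines.findIdx? (fun line => PySem.Str.isIn "import matplotlib" line)
      = lines.findIdx? pvP := rfl
  rw [hpp]
  cases h : lines.findIdx? pvP with
  | none => rfl
  | some i => simp [pvBlock, pvBlock4, pvExtra]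

-- ===== VERDICT (by name: the statement is the Claim_ definition above) =====
theorem add_headless_import_spec : Claim_equal_add_headless_import := by
  intro content _
  unfold Spec_add_headless_import add_headless_import add_headless_import_alt
  by_cases hg : PySem.Str.isIn "matplotlib.use('Agg')" content = true
  · rw [if_pos hg, if_pos hg]
  · rw [if_neg hg, if_neg hg]
    have h1 : (fun (st : List String × Bool) line =>
      if PySem.Str.isIn "import matplotlib" line && !st.2 then
        (st.1 ++ ["# Configure matplotlib for headless operation",
                  "import matplotlib",
                  "matplotlib.use('Agg')  # Use non-interactive backend",
                  ""] ++
          (if PySem.Str.strip line ≠ "import matplotlib" then [line] else []), true)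
      else (st.1 ++ [line], st.2)) = pvF := rfl
    show PySem.Str.join "\n"
        ((((PySem.Str.split? content "\n").getD []).foldl _ (([] : List String), false)).1) = _
    rw [h1]
    exact pvMain ((PySem.Str.split? content "\n").getD [])
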